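-- pv_equiv track=rewrite | github.com/OskarBreach/advent-of-code-2019 | day01.py | total_fuel_required
-- ===== SOURCE A (Python) =====
-- def fuel_required(mass):
--     return mass // 3 - 2
--
-- def total_fuel_required(mass):
--     fuel = fuel_required(mass)
--     total_fuel = 0
--
--     while fuel_required(fuel) > 0:
--         total_fuel += fuel
--         fuel = fuel_required(fuel)
--
--     total_fuel += fuel
--
--     return total_fuel
-- ===== SOURCE B (Python) =====
-- def sum_fuel(f):
--     if f <= 0:
--         return 0
--     return f + sum_fuel(f // 3 - 2)
--
-- def total_fuel_required(mass):
--     f1 = mass // 3 - 2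
--     return f1 + sum_fuel(f1 // 3 - 2)
-- ===== Notes on version B (the rewrite author's own statement) =====
-- stated objective: simpler
-- what changed: Replaces the while loop with accumulator by a recursive tail sum: the first fuel term is added unconditionally and sum_fuel recursively sums the subsequent terms while positive.
import Mathlib
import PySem

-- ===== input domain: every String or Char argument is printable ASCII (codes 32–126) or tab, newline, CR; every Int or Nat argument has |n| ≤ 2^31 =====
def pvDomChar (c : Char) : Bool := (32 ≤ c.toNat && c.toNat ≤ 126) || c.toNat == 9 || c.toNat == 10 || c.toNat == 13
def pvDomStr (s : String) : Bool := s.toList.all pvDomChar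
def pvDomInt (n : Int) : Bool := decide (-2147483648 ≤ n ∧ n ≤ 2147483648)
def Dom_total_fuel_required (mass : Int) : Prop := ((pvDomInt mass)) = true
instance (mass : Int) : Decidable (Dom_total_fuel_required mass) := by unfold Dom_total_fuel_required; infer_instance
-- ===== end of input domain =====

-- B replaces A's while loop and accumulator by a recursive sum of the fuel terms (simpler decomposition, same cost).

-- ===== PORT A =====
def fuel_required (mass : Int) : Int := PySem.Int.floordiv mass 3 - 2

-- termination helper for the while loop (cited by decreasing_by)
theorem fuel_required_toNat_lt (fuel : Int) (h : fuel_required fuel > 0) :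
    (fuel_required fuel).toNat < fuel.toNat := by
  unfold fuel_required at *
  rw [PySem.Int.floordiv_eq_ediv_of_pos (by omega)] at *
  omega

-- the 'while fuel_required(fuel) > 0: total_fuel += fuel; fuel = fuel_required(fuel)' loop,
-- followed by the final 'total_fuel += fuel'
def tfr_loop (fuel total_fuel : Int) : Int :=
  if h : fuel_required fuel > 0 then
    tfr_loop (fuel_required fuel) (total_fuel + fuel)
  else
    total_fuel + fuel
termination_by fuel.toNat
decreasing_by exact fuel_required_toNat_lt fuel h

def total_fuel_required (mass : Int) : Int :=
  tfr_loop (fuel_required mass) 0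

-- ===== PORT B =====
theorem sum_fuel_dec (f : Int) (h : ¬ f ≤ 0) :
    (PySem.Int.floordiv f 3 - 2).toNat < f.toNat := by
  rw [PySem.Int.floordiv_eq_ediv_of_pos (by omega)]
  omega

def sum_fuel (f : Int) : Int :=
  if h : f ≤ 0 then 0
  else f + sum_fuel (PySem.Int.floordiv f 3 - 2)
termination_by f.toNat
decreasing_by exact sum_fuel_dec f h

def total_fuel_required_alt (mass : Int) : Int :=
  let f1 := PySem.Int.floordiv mass 3 - 2
  f1 + sum_fuel (PySem.Int.floordiv f1 3 - 2)

-- ===== PRECONDITION & SPEC =====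
def Spec_total_fuel_required (mass : Int) (out : Int) : Prop := out = total_fuel_required_alt mass
instance (mass : Int) (out : Int) : Decidable (Spec_total_fuel_required mass out) := by unfold Spec_total_fuel_required; infer_instance

-- ===== CLAIM (what is proved, stated in full; the proofs are below) =====
def Claim_equal_total_fuel_required : Prop := ∀ (mass : Int), Dom_total_fuel_required mass → Spec_total_fuel_required mass (total_fuel_required mass)

-- ===== LEMMAS AND PROOFS =====

-- loop invariant: the loop's value is the accumulator, plus the current fuel term
-- (added unconditionally), plus the sum of the subsequent positive terms
theorem tfr_loop_eq (n : Nat) : ∀ (fuel total : Int), fuel.toNat ≤ n →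
    tfr_loop fuel total = total + fuel + sum_fuel (fuel_required fuel) := by
  induction n with
  | zero =>
      intro fuel total hle
      rw [tfr_loop, sum_fuel]
      have h9 : ¬ fuel_required fuel > 0 := by
        unfold fuel_required
        rw [PySem.Int.floordiv_eq_ediv_of_pos (by omega)]
        omega
      simp [h9, le_of_not_gt h9]
  | succ n ih =>
      intro fuel total hle
      rw [tfr_loop]
      by_cases h : fuel_required fuel > 0
      · have hlt := fuel_required_toNat_lt fuel h
        rw [dif_pos h, ih (fuel_required fuel) (total + fuel) (by omega)]
        conv_rhs => rw [sum_fuel]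
        rw [dif_neg (by omega)]
        unfold fuel_required
        ring_nf
      · rw [dif_neg h]
        conv_rhs => rw [sum_fuel]
        rw [dif_pos (le_of_not_gt h)]
        ring

-- ===== VERDICT (by name: the statement is the Claim_ definition above) =====
theorem total_fuel_required_spec : Claim_equal_total_fuel_required := by
  intro mass _
  unfold Spec_total_fuel_required total_fuel_required total_fuel_required_alt
  rw [tfr_loop_eq (fuel_required mass).toNat (fuel_required mass) 0 (le_refl _)]
  unfold fuel_required
  ring
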